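-- pv_equiv track=rewrite | github.com/jCalderTravis/expAnMo | helpers.py | dictCheckAndMerge
-- ===== SOURCE A (Python) =====
-- def dictCheckAndMerge(dictA, dictB):
--     """ Check keys in dictA and dictB are unique and then merge
--     """
--     allKeys = [list(thisDict.keys()) for thisDict in [dictA, dictB]]
--     if len(set(allKeys[0] + allKeys[1])) != \
--         (len(allKeys[0]) + len(allKeys[1])):
--         raise ValueError('Was requested to merge dictionaries ' +
--                         'but keys are not unqiue.')
--
--     dictC = {**dictA, **dictB}
--     return dictC
-- ===== SOURCE B (Python) =====
-- def dictCheckAndMerge(dictA, dictB):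
--     """ Check keys in dictA and dictB are unique and then merge
--     """
--     dictC = dict(dictA)
--     for key, value in dictB.items():
--         if key in dictC:
--             raise ValueError('Was requested to merge dictionaries ' +
--                             'but keys are not unqiue.')
--         dictC[key] = value
--     return dictC
-- ===== Notes on version B (the rewrite author's own statement) =====
-- stated objective: simpler
-- what changed: Replaces the two-phase key check (build the union set of all keys and compare its size against the summed key counts, then merge with {**a,**b}) by one fused pass that copies dictA and inserts dictB's items one by one, raising the identical ValueError the moment a duplicate key is probed.
import Mathlib
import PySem

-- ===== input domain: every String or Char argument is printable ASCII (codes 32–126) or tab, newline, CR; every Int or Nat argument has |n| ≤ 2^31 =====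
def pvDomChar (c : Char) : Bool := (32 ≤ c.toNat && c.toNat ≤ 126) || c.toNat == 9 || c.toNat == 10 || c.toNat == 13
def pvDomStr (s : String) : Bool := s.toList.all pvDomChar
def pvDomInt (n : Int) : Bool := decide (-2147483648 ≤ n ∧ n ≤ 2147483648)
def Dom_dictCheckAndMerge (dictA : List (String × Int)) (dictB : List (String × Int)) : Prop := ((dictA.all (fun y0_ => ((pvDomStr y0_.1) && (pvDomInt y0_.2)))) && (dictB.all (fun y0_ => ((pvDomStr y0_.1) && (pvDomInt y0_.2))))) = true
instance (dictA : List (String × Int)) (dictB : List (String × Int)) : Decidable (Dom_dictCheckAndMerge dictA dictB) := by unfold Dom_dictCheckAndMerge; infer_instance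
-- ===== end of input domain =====

-- B fuses A's two phases (build the union set of all keys and compare sizes, then merge)
-- into one pass that copies dictA and membership-probes each dictB key while inserting.
-- Equivalence is about the RETURN value on inputs where A returns (disjoint keys).

-- ===== PORT A =====
-- allKeys = [list(dictA.keys()), list(dictB.keys())]; the raise branch is excluded by Pre_.
def dictCheckAndMerge (dictA : List (String × Int)) (dictB : List (String × Int)) : List (String × Int) :=
  let allKeys : List (List String) :=
    [dictA, dictB].map (fun thisDict => (PySem.Dict.mk thisDict).keys)
  if (PySem.Set.ofList (allKeys.getD 0 [] ++ allKeys.getD 1 [])).length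
      ≠ (allKeys.getD 0 []).length + (allKeys.getD 1 []).length then
    []  -- raise ValueError('Was requested to merge dictionaries but keys are not unqiue.')
  else
    -- dictC = {**dictA, **dictB}
    ((PySem.Dict.mk dictA).update dictB).items

-- ===== PORT B =====
-- the for-loop of Source B: insert dictB's items into the copy dictC, none = the ValueError raise
def pvMergeLoop (dictC : PySem.Dict String Int) (bs : List (String × Int)) :
    Option (PySem.Dict String Int) :=
  match bs with
  | [] => some dictC
  | (key, value) :: rest =>
      if dictC.contains key then
        none  -- raise ValueError('Was requested to merge dictionaries but keys are not unqiue.')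
      else
        pvMergeLoop (dictC.insert key value) rest

def dictCheckAndMerge_alt (dictA : List (String × Int)) (dictB : List (String × Int)) : List (String × Int) :=
  match pvMergeLoop (PySem.Dict.mk dictA) dictB with
  | some dictC => dictC.items
  | none => []  -- the raise, excluded by Pre_

-- ===== PRECONDITION & SPEC =====
-- Pre_ admits exactly the inputs on which Python A returns: the keys of the two dicts
-- are pairwise distinct (on overlapping keys both programs raise the same ValueError).
def Pre_dictCheckAndMerge (dictA : List (String × Int)) (dictB : List (String × Int)) : Prop :=
  (dictA.map Prod.fst ++ dictB.map Prod.fst).Nodup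
instance (dictA : List (String × Int)) (dictB : List (String × Int)) : Decidable (Pre_dictCheckAndMerge dictA dictB) := by unfold Pre_dictCheckAndMerge; infer_instance

def pvWitness_dictCheckAndMerge : (List (String × Int)) × (List (String × Int)) :=
  ([("a", 1), ("b", 2)], [("c", 3)])

def Spec_dictCheckAndMerge (dictA : List (String × Int)) (dictB : List (String × Int)) (out : List (String × Int)) : Prop := out = dictCheckAndMerge_alt dictA dictB
instance (dictA : List (String × Int)) (dictB : List (String × Int)) (out : List (String × Int)) : Decidable (Spec_dictCheckAndMerge dictA dictB out) := by unfold Spec_dictCheckAndMerge; infer_instance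

-- ===== CLAIM (what is proved, stated in full; the proofs are below) =====
def Claim_equal_dictCheckAndMerge : Prop := ∀ (dictA : List (String × Int)) (dictB : List (String × Int)), Dom_dictCheckAndMerge dictA dictB → Pre_dictCheckAndMerge dictA dictB → Spec_dictCheckAndMerge dictA dictB (dictCheckAndMerge dictA dictB)

-- ===== LEMMAS AND PROOFS =====

-- B's loop never fires the raise and folds exactly like Dict.update when the incoming
-- keys are fresh for the accumulator and mutually distinct.
theorem pvMergeLoop_eq_update (bs : List (String × Int)) (d : PySem.Dict String Int)
    (hfresh : ∀ k ∈ bs.map Prod.fst, d.contains k = false)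
    (hnd : (bs.map Prod.fst).Nodup) :
    pvMergeLoop d bs = some (d.update bs) := by
  induction bs generalizing d with
  | nil => rfl
  | cons p rest ih =>
    obtain ⟨k, v⟩ := p
    simp only [List.map_cons, List.nodup_cons] at hnd
    have hk : d.contains k = false := hfresh k (by simp)
    rw [pvMergeLoop, hk]
    simp only [Bool.false_eq_true, if_false]
    have : (d.insert k v).update rest = d.update ((k, v) :: rest) := by
      simp [PySem.Dict.update]
    rw [ih (d.insert k v) ?_ hnd.2, this]
    intro k' hk'
    have hne : (k == k') = false := by
      rcases List.mem_map.1 hk' with ⟨q, hq, rfl⟩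
      exact beq_eq_false_iff_ne.2 fun h => hnd.1 (h ▸ List.mem_map_of_mem hq)
    have hdk' : d.contains k' = false := hfresh k' (by simp [hk'])
    simp only [PySem.Dict.contains] at hk hdk'
    simp [PySem.Dict.insert, PySem.Dict.contains, hk, hdk', hne]

-- ===== VERDICT =====
theorem dictCheckAndMerge_spec : Claim_equal_dictCheckAndMerge := by
  intro dictA dictB _ hpre
  unfold Pre_dictCheckAndMerge at hpre
  unfold Spec_dictCheckAndMerge dictCheckAndMerge dictCheckAndMerge_alt
  -- the set-length check of A passes
  have hset : PySem.Set.ofList (dictA.map Prod.fst ++ dictB.map Prod.fst)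
      = dictA.map Prod.fst ++ dictB.map Prod.fst :=
    PySem.Set.ofList_eq_self_of_nodup _ hpre
  -- B's loop succeeds
  rw [List.nodup_append] at hpre
  have hloop : pvMergeLoop (PySem.Dict.mk dictA) dictB
      = some ((PySem.Dict.mk dictA).update dictB) := by
    apply pvMergeLoop_eq_update _ _ _ hpre.2.1
    intro k hk
    have hknA : k ∉ dictA.map Prod.fst := fun hmem => hpre.2.2 k hmem k hk rfl
    simp only [PySem.Dict.contains, List.any_eq_false, beq_iff_eq]
    intro p hp h
    exact hknA (h ▸ List.mem_map_of_mem hp)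
  rw [hloop]
  simp [PySem.Dict.keys, hset]

-- ===== VERDICT (by name: the statement is the Claim_ definition above) =====
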